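-- pv_equiv track=rewrite | github.com/Spoirad/Honeypot | log_parser.py | group_events_by_hour
-- ===== SOURCE A (Python) =====
-- from collections import Counter, defaultdict
--
-- def group_events_by_hour(events):
--     """Agrupa eventos por hora para gráficas temporales"""
--     hourly = defaultdict(int)
--     for e in events:
--         ts = e.get("ts", "")
--         if ts:
--             # Formato: "2025-12-07 17:50:22,539"
--             hour_key = ts[:13]  # "2025-12-07 17"
--             hourly[hour_key] += 1
--     return dict(sorted(hourly.items()))
-- ===== SOURCE B (Python) =====
-- def group_events_by_hour(events):
--     """Agrupa eventos por hora para gráficas temporales"""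
--     keys = sorted(ts[:13] for e in events if (ts := e.get("ts", "")))
--     result = {}
--     while keys:
--         k = keys[0]
--         run = 1
--         while run < len(keys) and keys[run] == k:
--             run += 1
--         result[k] = run
--         keys = keys[run:]
--     return result
-- ===== Notes on version B (the rewrite author's own statement) =====
-- stated objective: alternative
-- what changed: Replaces the defaultdict counter (hash-then-sort-keys) by extracting all hour keys in one comprehension, sorting them, and counting adjacent equal runs with a two-index scan.
import Mathlib
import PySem

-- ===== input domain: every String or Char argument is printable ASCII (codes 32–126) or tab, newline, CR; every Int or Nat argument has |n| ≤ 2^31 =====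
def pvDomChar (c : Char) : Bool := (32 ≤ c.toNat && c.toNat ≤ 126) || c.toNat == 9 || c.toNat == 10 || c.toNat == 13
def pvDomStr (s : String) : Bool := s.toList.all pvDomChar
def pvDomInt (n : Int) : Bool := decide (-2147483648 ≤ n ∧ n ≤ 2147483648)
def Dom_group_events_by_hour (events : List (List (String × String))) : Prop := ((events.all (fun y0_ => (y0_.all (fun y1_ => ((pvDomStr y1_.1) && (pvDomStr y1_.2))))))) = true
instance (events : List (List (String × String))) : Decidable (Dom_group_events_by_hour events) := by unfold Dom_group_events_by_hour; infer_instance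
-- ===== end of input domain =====

-- B extracts the hour keys, sorts them, and counts adjacent equal runs instead of hashing into a counter and sorting its keys (alternative algorithm, same results).


-- ===== PORT A =====
-- hourly = defaultdict(int); for e in events: ts = e.get("ts",""); if ts: hourly[ts[:13]] += 1; return dict(sorted(hourly.items()))
def group_events_by_hour (events : List (List (String × String))) : List (String × Int) :=
  let hourly := events.foldl (fun d e =>
      let ts := (PySem.Dict.ofList e).getD "ts" ""
      if ts ≠ "" then d.modify (PySem.Str.slice ts none (some 13)) 0 (· + 1) else d)
    (PySem.Dict.empty : PySem.Dict String Int)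
  PySem.List.sorted2 hourly.items (fun p => p.1) (fun p => p.2)

-- ===== PORT B =====
-- keys = sorted(ts[:13] for e in events if (ts := e.get("ts", "")))
def pvKeys (events : List (List (String × String))) : List String :=
  events.filterMap (fun e =>
    let ts := (PySem.Dict.ofList e).getD "ts" ""
    if ts ≠ "" then some (PySem.Str.slice ts none (some 13)) else none)

-- the outer while loop: take the head key, count its run (inner while = 1 + leading equal elements), drop the run, continue
def pvGroupRuns : List String → List (String × Int)
  | [] => []
  | k :: rest =>
      (k, 1 + ((rest.takeWhile (· == k)).length : Int)) :: pvGroupRuns (rest.dropWhile (· == k))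
  termination_by l => l.length
  decreasing_by simpa using Nat.lt_succ_of_le ((List.dropWhile_sublist _).length_le)

def group_events_by_hour_alt (events : List (List (String × String))) : List (String × Int) :=
  pvGroupRuns (PySem.List.sorted (pvKeys events) (fun x => x))

-- ===== PRECONDITION & SPEC =====
def Spec_group_events_by_hour (events : List (List (String × String))) (out : List (String × Int)) : Prop := out = group_events_by_hour_alt events
instance (events : List (List (String × String))) (out : List (String × Int)) : Decidable (Spec_group_events_by_hour events out) := by unfold Spec_group_events_by_hour; infer_instance

-- ===== CLAIM (what is proved, stated in full; the proofs are below) =====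
def Claim_equal_group_events_by_hour : Prop := ∀ (events : List (List (String × String))), Dom_group_events_by_hour events → Spec_group_events_by_hour events (group_events_by_hour events)

-- ===== LEMMAS AND PROOFS =====

-- A's loop over events is the counter loop over the extracted key list
theorem foldA_keys (events : List (List (String × String))) (d : PySem.Dict String Int) :
    events.foldl (fun d e =>
      let ts := (PySem.Dict.ofList e).getD "ts" ""
      if ts ≠ "" then d.modify (PySem.Str.slice ts none (some 13)) 0 (· + 1) else d) d
    = (pvKeys events).foldl (fun d x => d.modify x 0 (· + 1)) d := by
  induction events generalizing d with
  | nil => simp [pvKeys]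
  | cons e rest ih =>
    by_cases h : (PySem.Dict.ofList e).getD "ts" "" ≠ ""
    · simp only [pvKeys, List.filterMap_cons, List.foldl_cons, if_pos h] at *
      exact ih _
    · simp only [pvKeys, List.filterMap_cons, List.foldl_cons, if_neg h] at *
      exact ih _

theorem insertBy_congr {α : Type} (b1 b2 : α → α → Bool) (x : α) (acc : List α)
    (h : ∀ y ∈ acc, b1 x y = b2 x y) :
    PySem.List.insertBy b1 x acc = PySem.List.insertBy b2 x acc := by
  induction acc with
  | nil => rfl
  | cons y ys ih =>
    simp only [PySem.List.insertBy]
    rw [h y (List.mem_cons_self), ih (fun z hz => h z (List.mem_cons_of_mem _ hz))]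

theorem foldl_insertBy_congr {α : Type} (b1 b2 : α → α → Bool) (xs acc : List α)
    (h : ∀ x y, x ∈ xs → (y ∈ xs ∨ y ∈ acc) → b1 x y = b2 x y) :
    xs.foldl (fun a x => PySem.List.insertBy b1 x a) acc
    = xs.foldl (fun a x => PySem.List.insertBy b2 x a) acc := by
  induction xs generalizing acc with
  | nil => rfl
  | cons x xs ih =>
    simp only [List.foldl_cons]
    rw [insertBy_congr b1 b2 x acc
      (fun y hy => h x y (List.mem_cons_self) (Or.inr hy))]
    exact ih _ (fun a b ha hb => h a b (List.mem_cons_of_mem _ ha) (by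
      rcases hb with hb | hb
      · exact Or.inl (List.mem_cons_of_mem _ hb)
      · rcases (PySem.List.mem_insertBy b2 x b acc).mp hb with hb | hb
        · exact Or.inl (hb ▸ List.mem_cons_self)
        · exact Or.inr hb))

-- when first components are pairwise distinct, Python's tuple sort is the sort by first component
theorem sorted2_eq_sorted_fst (S : List (String × Int))
    (hS : ∀ a ∈ S, ∀ b ∈ S, a = b ∨ a.1 ≠ b.1) :
    PySem.List.sorted2 S (fun p => p.1) (fun p => p.2)
    = PySem.List.sorted S (fun p => p.1) := by
  rw [PySem.List.sorted_eq_foldl_insertBy]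
  simp only [PySem.List.sorted2, if_neg (by decide : ¬ (false = true))]
  apply foldl_insertBy_congr
  intro a b ha hb
  rcases hb with hb | hb
  swap; · simp at hb
  rcases hS a ha b hb with rfl | hne
  · simp
  · rcases lt_or_gt_of_ne hne with hlt | hgt
    · simp [hlt, asymm hlt]
    · simp [hgt, asymm hgt]

-- the deduplicated list is a sublist of the original
theorem ofList_sublist {α : Type} [BEq α] [LawfulBEq α] (l : List α) :
    (PySem.Set.ofList l).Sublist l := by
  induction l with
  | nil => simp [PySem.Set.ofList, PySem.Set.empty]
  | cons x xs ih =>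
    rw [PySem.Set.ofList_cons]
    exact List.Sublist.cons₂ x ((List.filter_sublist).trans ih)

-- skipping elements already present
theorem foldl_add_skip {α : Type} [BEq α] [LawfulBEq α] (t : List α) (acc : PySem.Set α)
    (h : ∀ x ∈ t, acc.contains x = true) :
    t.foldl PySem.Set.add acc = acc := by
  induction t with
  | nil => rfl
  | cons x xs ih =>
    simp only [List.foldl_cons]
    rw [PySem.Set.add, if_pos (h x (List.mem_cons_self))]
    exact ih (fun y hy => h y (List.mem_cons_of_mem _ hy))

-- an element absent from the rest stays at the head of the accumulator
theorem foldl_add_cons_out {α : Type} [BEq α] [LawfulBEq α] (r : List α) (k : α) (s : List α)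
    (h : k ∉ r) :
    r.foldl PySem.Set.add (k :: s) = k :: r.foldl PySem.Set.add s := by
  induction r generalizing s with
  | nil => rfl
  | cons x xs ih =>
    have hxk : x ≠ k := by rintro rfl; exact h List.mem_cons_self
    have hh : k ∉ xs := fun hm => h (List.mem_cons_of_mem _ hm)
    have hc : PySem.Set.contains (k :: s) x = PySem.Set.contains s x := by
      simp [PySem.Set.contains]
      exact fun he => absurd he hxk
    simp only [List.foldl_cons, PySem.Set.add, hc]
    by_cases hs : PySem.Set.contains s x = true
    · rw [if_pos hs, if_pos hs]
      exact ih _ hh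
    · rw [if_neg hs, if_neg hs, List.cons_append, ih _ hh]

-- ofList of a head, its run, and a remainder not containing the head
theorem ofList_cons_run (k : String) (t r : List String)
    (ht : ∀ x ∈ t, x = k) (hr : k ∉ r) :
    PySem.Set.ofList (k :: (t ++ r)) = k :: PySem.Set.ofList r := by
  show List.foldl PySem.Set.add PySem.Set.empty (k :: (t ++ r)) = _
  simp only [List.foldl_cons, List.foldl_append]
  have h0 : PySem.Set.add PySem.Set.empty k = [k] := rfl
  rw [h0, foldl_add_skip t [k] (fun x hx => by simp [PySem.Set.contains, ht x hx])]
  exact foldl_add_cons_out r k [] hr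

-- B's run-counting scan over a sorted list produces each distinct key once, with its count
theorem pvGroupRuns_sorted (l : List String) (h : l.Pairwise (· ≤ ·)) :
    pvGroupRuns l = (PySem.Set.ofList l).map (fun k => (k, (l.count k : Int))) := by
  induction l using pvGroupRuns.induct with
  | case1 => simp [pvGroupRuns, PySem.Set.ofList, PySem.Set.empty]
  | case2 k rest ih =>
    have hpair := List.pairwise_cons.mp h
    have hk : ∀ x ∈ rest, k ≤ x := hpair.1
    have hrest : rest.Pairwise (· ≤ ·) := hpair.2
    set t := rest.takeWhile (· == k) with ht_def
    set r := rest.dropWhile (· == k) with hr_def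
    have htr : t ++ r = rest := List.takeWhile_append_dropWhile
    have ht : ∀ x ∈ t, x = k := fun x hx => by
      have := List.mem_takeWhile_imp hx; simpa using this.symm
    have hr_pw : r.Pairwise (· ≤ ·) := List.Pairwise.sublist (List.dropWhile_sublist _) hrest
    have hknr : k ∉ r := by
      intro hmem
      have hne : r ≠ [] := List.ne_nil_of_mem hmem
      cases hr : r with
      | nil => exact hne hr
      | cons y r' =>
        have hy : (y == k) = false := by
          have := List.head_dropWhile_not (· == k) (l := rest) (by rw [← hr_def]; exact hne)
          simpa [← hr_def, hr] using this
        have hyk : y ≠ k := by simpa using hy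
        have hy_mem : y ∈ rest := (List.dropWhile_sublist _).mem (by rw [← hr_def, hr]; exact List.mem_cons_self)
        have hky : k ≤ y := hk y hy_mem
        rcases List.mem_cons.mp (by rw [hr] at hmem; exact hmem : k ∈ y :: r') with he | hmem'
        · exact hyk he.symm
        · have hyk' : y ≤ k := (List.pairwise_cons.mp (hr ▸ hr_pw)).1 k hmem'
          exact hyk (le_antisymm hyk' hky)
    have hcount_k : (k :: rest).count k = t.length + 1 := by
      rw [← htr, List.count_cons_self, List.count_append,
        List.count_eq_length.mpr (fun b hb => (ht b hb).symm),
        List.count_eq_zero.mpr hknr]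
    have hofl : PySem.Set.ofList (k :: rest) = k :: PySem.Set.ofList r := by
      rw [← htr]; exact ofList_cons_run k t r ht hknr
    rw [pvGroupRuns, ih hr_pw, hofl, List.map_cons, hcount_k, ← ht_def]
    congr 1
    · simp
      omega
    · apply List.map_congr_left
      intro k' hk'
      have hk'r : k' ∈ r := (PySem.Set.mem_ofList r k').mp hk'
      have hk'ne : k' ≠ k := fun he => hknr (he ▸ hk'r)
      have : (k :: rest).count k' = r.count k' := by
        rw [← htr]
        simp [List.count_append, Ne.symm hk'ne,
          List.count_eq_zero.mpr (fun hmem => hk'ne (ht k' hmem))]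
      rw [this]

-- deduplicating after sorting equals sorting the deduplicated keys
theorem ofList_sorted (ks : List String) :
    PySem.Set.ofList (PySem.List.sorted ks (fun x => x))
    = PySem.List.sorted (PySem.Set.ofList ks) (fun x => x) := by
  symm
  apply PySem.List.sorted_eq_of_perm_of_pairwise_lt
  · exact (List.perm_ext_iff_of_nodup (PySem.Set.nodup_ofList _) (PySem.Set.nodup_ofList _)).mpr
      (fun a => by
        rw [PySem.Set.mem_ofList, PySem.Set.mem_ofList, PySem.List.mem_sorted])
  · have hle : (PySem.Set.ofList (PySem.List.sorted ks (fun x => x))).Pairwise (· ≤ ·) :=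
      List.Pairwise.sublist (ofList_sublist _) (PySem.List.sorted_pairwise ks (fun x => x))
    have hne : (PySem.Set.ofList (PySem.List.sorted ks (fun x => x))).Pairwise (· ≠ ·) :=
      PySem.Set.nodup_ofList _
    exact (hle.and hne).imp (fun ⟨h1, h2⟩ => lt_of_le_of_ne h1 h2)

-- ===== VERDICT (by name: the statement is the Claim_ definition above) =====
theorem group_events_by_hour_spec : Claim_equal_group_events_by_hour := by
  intro events _
  unfold Spec_group_events_by_hour group_events_by_hour group_events_by_hour_alt
  rw [foldA_keys, ← PySem.Dict.counter_eq_foldl]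
  show PySem.List.sorted2 (PySem.Dict.counter (pvKeys events)).items (fun p => p.1) (fun p => p.2) = _
  set ks := pvKeys events with hks
  rw [PySem.Dict.items_counter]
  have hinj : ∀ a ∈ (PySem.Set.ofList ks).map (fun k => (k, (ks.count k : Int))),
      ∀ b ∈ (PySem.Set.ofList ks).map (fun k => (k, (ks.count k : Int))), a = b ∨ a.1 ≠ b.1 := by
    intro a ha b hb
    rcases List.mem_map.mp ha with ⟨ka, _, rfl⟩
    rcases List.mem_map.mp hb with ⟨kb, _, rfl⟩
    by_cases he : ka = kb
    · exact Or.inl (by rw [he])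
    · exact Or.inr (by simpa using he)
  rw [sorted2_eq_sorted_fst _ hinj]
  rw [PySem.List.sorted_eq_of_perm_of_pairwise_lt
    ((PySem.Set.ofList ks).map (fun k => (k, (ks.count k : Int))))
    ((PySem.List.sorted (PySem.Set.ofList ks) (fun x => x)).map (fun k => (k, (ks.count k : Int))))
    (fun p => p.1)
    ((PySem.List.sorted_perm _ _ _).map _)
    (List.Pairwise.map _ (fun a b hab => hab) (PySem.List.sorted_ofList_pairwise_lt ks))]
  rw [pvGroupRuns_sorted _ (PySem.List.sorted_pairwise ks (fun x => x)), ofList_sorted]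
  apply List.map_congr_left
  intro k _
  rw [(PySem.List.sorted_perm ks (fun x => x) false).count_eq]
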